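-- pv_equiv track=rewrite | github.com/pypi-data/pypi-mirror-400 | packages/pochi/pochi-0.1.3-py3-none-any.whl/pochi/telegram/bridge.py | build_bot_commands
-- ===== SOURCE A (Python) =====
-- def build_bot_commands(
--     engine_ids: tuple[str, ...],
--     workspace_commands: dict[str, str] | None = None,
-- ) -> list[dict[str, str]]:
--     """Build the command menu for the bot."""
--     commands: list[dict[str, str]] = []
--     seen: set[str] = set()
--
--     # Add engine commands
--     for engine_id in engine_ids:
--         cmd = engine_id.lower()
--         if cmd in seen:
--             continue
--         commands.append({"command": cmd, "description": f"start {cmd}"})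
--         seen.add(cmd)
--
--     # Add workspace commands
--     if workspace_commands:
--         for cmd, desc in workspace_commands.items():
--             if cmd not in seen:
--                 commands.append({"command": cmd, "description": desc})
--                 seen.add(cmd)
--
--     # Add cancel
--     if "cancel" not in seen:
--         commands.append({"command": "cancel", "description": "cancel current run"})
--
--     return commands
-- ===== SOURCE B (Python) =====
-- def build_bot_commands(engine_ids, workspace_commands=None):
--     """Build the command menu for the bot.
--
--     Nub-by-filtering: repeatedly emit the first remaining candidate and delete
--     every later occurrence of its command from the remainder. No seen-set.
--     """
--     pairs = [(e.lower(), f"start {e.lower()}") for e in engine_ids]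
--     pairs += list((workspace_commands or {}).items())
--     pairs.append(("cancel", "cancel current run"))
--
--     commands = []
--     while pairs:
--         cmd, desc = pairs[0]
--         commands.append({"command": cmd, "description": desc})
--         pairs = [(c, d) for (c, d) in pairs[1:] if c != cmd]
--     return commands
-- ===== Notes on version B (the rewrite author's own statement) =====
-- stated objective: alternative
-- what changed: Replaces A's stateful seen-set dedup over three separate blocks with a nub over one candidate chain: repeatedly emit the first remaining pair and filter all later occurrences of its command out of the remainder, so no seen set or per-branch logic is needed.
import Mathlib
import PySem

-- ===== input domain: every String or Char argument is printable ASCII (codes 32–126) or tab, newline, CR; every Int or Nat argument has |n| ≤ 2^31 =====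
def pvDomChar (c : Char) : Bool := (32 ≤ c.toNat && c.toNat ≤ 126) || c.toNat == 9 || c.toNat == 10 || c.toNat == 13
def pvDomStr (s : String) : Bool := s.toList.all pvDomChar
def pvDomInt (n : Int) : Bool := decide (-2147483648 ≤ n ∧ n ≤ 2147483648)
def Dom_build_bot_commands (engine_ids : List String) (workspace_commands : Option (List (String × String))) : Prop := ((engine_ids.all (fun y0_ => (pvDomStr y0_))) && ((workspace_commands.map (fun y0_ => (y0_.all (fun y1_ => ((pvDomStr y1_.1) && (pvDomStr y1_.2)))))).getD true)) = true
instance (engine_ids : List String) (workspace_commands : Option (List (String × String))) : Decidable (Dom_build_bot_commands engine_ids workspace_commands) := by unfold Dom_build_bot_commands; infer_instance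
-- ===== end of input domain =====

-- B replaces A's stateful seen-set dedup spread over three blocks with a recursive nub over
-- one candidate chain: emit the head, filter later occurrences of its command out, recurse.

-- ===== PORT A =====
def build_bot_commands (engine_ids : List String) (workspace_commands : Option (List (String × String))) : List (List (String × String)) :=
  -- commands = []; seen = set(); engine loop
  let st1 := engine_ids.foldl (fun (st : List (List (String × String)) × PySem.Set String) engine_id =>
      let cmd := PySem.Str.lower engine_id
      if PySem.Set.contains st.2 cmd then st
      else (st.1 ++ [[("command", cmd), ("description", "start " ++ cmd)]], PySem.Set.add st.2 cmd))
    ([], PySem.Set.empty)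
  -- if workspace_commands: (None and {} are both falsy)
  let st2 := match workspace_commands with
    | none => st1
    | some ws =>
      if ws = [] then st1
      else ws.foldl (fun (st : List (List (String × String)) × PySem.Set String) (cd : String × String) =>
          if PySem.Set.contains st.2 cd.1 then st
          else (st.1 ++ [[("command", cd.1), ("description", cd.2)]], PySem.Set.add st.2 cd.1)) st1
  -- add cancel
  if PySem.Set.contains st2.2 "cancel" then st2.1
  else st2.1 ++ [[("command", "cancel"), ("description", "cancel current run")]]

-- ===== PORT B =====
-- B's recursive nub: keep the head pair, drop all later pairs with the same command, recurse.
def pvDedup : List (String × String) → List (List (String × String))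
  | [] => []
  | (c, d) :: rest =>
      [("command", c), ("description", d)] :: pvDedup (rest.filter (fun p => p.1 ≠ c))
termination_by pairs => pairs.length
decreasing_by
  simp only [List.length_unattach, List.length_cons]
  exact Nat.lt_succ_of_le (le_trans (List.length_filter_le _ _) (by simp))

def build_bot_commands_alt (engine_ids : List String) (workspace_commands : Option (List (String × String))) : List (List (String × String)) :=
  let pairs :=
    engine_ids.map (fun e => (PySem.Str.lower e, "start " ++ PySem.Str.lower e))
      ++ (workspace_commands.getD [])
      ++ [("cancel", "cancel current run")]
  pvDedup pairs

-- ===== PRECONDITION & SPEC =====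
def Spec_build_bot_commands (engine_ids : List String) (workspace_commands : Option (List (String × String))) (out : List (List (String × String))) : Prop := out = build_bot_commands_alt engine_ids workspace_commands
instance (engine_ids : List String) (workspace_commands : Option (List (String × String))) (out : List (List (String × String))) : Decidable (Spec_build_bot_commands engine_ids workspace_commands out) := by unfold Spec_build_bot_commands; infer_instance

-- ===== CLAIM =====
def Claim_equal_build_bot_commands : Prop := ∀ (engine_ids : List String) (workspace_commands : Option (List (String × String))), Dom_build_bot_commands engine_ids workspace_commands → Spec_build_bot_commands engine_ids workspace_commands (build_bot_commands engine_ids workspace_commands)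

-- ===== LEMMAS AND PROOFS =====
-- A's dedup step, named for the proofs (identical to the lambdas in A's port).
def pvStep (st : List (List (String × String)) × PySem.Set String) (cd : String × String) :
    List (List (String × String)) × PySem.Set String :=
  if PySem.Set.contains st.2 cd.1 then st
  else (st.1 ++ [[("command", cd.1), ("description", cd.2)]], PySem.Set.add st.2 cd.1)

-- Core invariant: the seen-set fold equals acc ++ the recursive nub of the not-yet-seen pairs.
theorem foldl_pvStep_eq_pvDedup (l : List (String × String)) :
    ∀ (acc : List (List (String × String))) (seen : PySem.Set String),
      (l.foldl pvStep (acc, seen)).1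
        = acc ++ pvDedup (l.filter (fun p => ¬ p.1 ∈ seen)) := by
  induction l with
  | nil => intro acc seen; simp [pvDedup]
  | cons p l ih =>
    intro acc seen
    by_cases h : p.1 ∈ seen
    · have hstep : pvStep (acc, seen) p = (acc, seen) := by simp [pvStep, h]
      rw [List.foldl_cons, hstep, ih]
      simp [h]
    · have hstep : pvStep (acc, seen) p
          = (acc ++ [[("command", p.1), ("description", p.2)]], PySem.Set.add seen p.1) := by
        simp [pvStep, h]
      have hfil : (l.filter (fun q => ¬ q.1 ∈ PySem.Set.add seen p.1))
          = (l.filter (fun q => ¬ q.1 ∈ seen)).filter (fun q => q.1 ≠ p.1) := by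
        rw [List.filter_filter]
        apply List.filter_congr
        intro q _
        by_cases hq : q.1 = p.1 <;> simp [hq, h]
      rw [List.foldl_cons, hstep, ih, hfil]
      obtain ⟨c, d⟩ := p
      simp only [List.filter_cons, decide_not]
      rw [if_pos (by simpa using h)]
      rw [show pvDedup ((c, d) :: List.filter (fun q => !decide (q.1 ∈ seen)) l)
            = [("command", c), ("description", d)] ::
              pvDedup ((List.filter (fun q => !decide (q.1 ∈ seen)) l).filter (fun q => q.1 ≠ c)) from by
        simp [pvDedup]]
      simp [List.filter_filter, Bool.and_comm]

-- The cancel branch is one more pvStep, projected.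
theorem pv_cancel_step (st : List (List (String × String)) × PySem.Set String) :
    (if PySem.Set.contains st.2 "cancel" then st.1
     else st.1 ++ [[("command", "cancel"), ("description", "cancel current run")]])
      = (pvStep st ("cancel", "cancel current run")).1 := by
  unfold pvStep; split <;> rfl

theorem build_bot_commands_eq_alt (engine_ids : List String) (workspace_commands : Option (List (String × String))) :
    build_bot_commands engine_ids workspace_commands = build_bot_commands_alt engine_ids workspace_commands := by
  have hnub : ∀ (l : List (String × String)),
      (l.foldl pvStep ([], PySem.Set.empty)).1 = pvDedup l := by
    intro l
    rw [foldl_pvStep_eq_pvDedup]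
    simp [PySem.Set.empty]
  unfold build_bot_commands build_bot_commands_alt
  cases workspace_commands with
  | none =>
    rw [← hnub (engine_ids.map (fun e => (PySem.Str.lower e, "start " ++ PySem.Str.lower e))
        ++ (Option.getD (α := List (String × String)) none []) ++ [("cancel", "cancel current run")])]
    simp only [List.foldl_append, List.foldl_map, List.foldl_cons, List.foldl_nil, Option.getD_none]
    exact pv_cancel_step _
  | some ws =>
    by_cases hws : ws = []
    · subst hws
      dsimp only [Option.getD_some]
      rw [← hnub (engine_ids.map (fun e => (PySem.Str.lower e, "start " ++ PySem.Str.lower e))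
          ++ ([] : List (String × String)) ++ [("cancel", "cancel current run")])]
      simp only [List.foldl_append, List.foldl_map, List.foldl_cons, List.foldl_nil, if_pos rfl]
      exact pv_cancel_step _
    · dsimp only [Option.getD_some]
      rw [← hnub (engine_ids.map (fun e => (PySem.Str.lower e, "start " ++ PySem.Str.lower e))
          ++ ws ++ [("cancel", "cancel current run")])]
      simp only [List.foldl_append, List.foldl_map, List.foldl_cons, List.foldl_nil, if_neg hws]
      exact pv_cancel_step _

-- ===== VERDICT =====
theorem build_bot_commands_spec : Claim_equal_build_bot_commands := by
  intro engine_ids workspace_commands _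
  exact build_bot_commands_eq_alt engine_ids workspace_commands
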